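-- pv_equiv track=rewrite | github.com/jahorta/SALSA | SALSA/Project/description_formatting.py | check_params_are_numeric
-- ===== SOURCE A (Python) =====
-- from typing import List
--
-- def check_params_are_numeric(paramlist: List[str]):
--     result = ''
--     numeric = True
--     for param in paramlist:
--         if param.count('.') > 1:
--             numeric = False
--         if not param.replace('.', '').lstrip('-').isnumeric():
--             numeric = False
--         result += f'{param},'
--
--     if numeric:
--         return None
--     return result
-- ===== SOURCE B (Python) =====
-- from typing import List
--
-- def _is_numeric_param(p: str) -> bool:
--     # one left-to-right character scan: optional minus signs allowed only before
--     # the first digit, at most one dot anywhere, at least one digit, nothing else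
--     dots = 0
--     seen_digit = False
--     for ch in p:
--         if ch == '.':
--             dots += 1
--             if dots > 1:
--                 return False
--         elif ch == '-':
--             if seen_digit:
--                 return False
--         elif '0' <= ch <= '9':
--             seen_digit = True
--         else:
--             return False
--     return seen_digit
--
-- def check_params_are_numeric(paramlist: List[str]):
--     for p in paramlist:
--         if not _is_numeric_param(p):
--             return ''.join(f'{q},' for q in paramlist)
--     return None
-- ===== Notes on version B (the rewrite author's own statement) =====
-- stated objective: faster
-- what changed: A fuses string accumulation (repeated +=) and a validity flag in one loop, deciding validity per param via count/replace/lstrip/isnumeric string methods; B searches for the first invalid param with early exit, decides validity by a one-pass character state machine (dots counter, seen-digit flag, minus only before the first digit), and builds the comma-terminated string only in the invalid case.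
import Mathlib
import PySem

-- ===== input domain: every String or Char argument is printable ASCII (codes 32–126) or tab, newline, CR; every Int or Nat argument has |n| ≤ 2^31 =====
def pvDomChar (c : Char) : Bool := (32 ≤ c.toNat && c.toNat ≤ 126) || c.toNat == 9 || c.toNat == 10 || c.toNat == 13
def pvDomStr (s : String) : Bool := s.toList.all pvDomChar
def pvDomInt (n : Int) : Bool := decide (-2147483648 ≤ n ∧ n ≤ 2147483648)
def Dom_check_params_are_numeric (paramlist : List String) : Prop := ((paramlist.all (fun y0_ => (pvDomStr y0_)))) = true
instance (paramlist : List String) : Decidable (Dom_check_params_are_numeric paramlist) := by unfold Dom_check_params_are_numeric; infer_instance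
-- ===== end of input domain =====

-- B replaces A's fused accumulate-and-flag loop with library string predicates by an
-- early-exit search for an invalid param, validity decided by a one-pass character
-- state machine; the formatted string is built only when needed, avoiding quadratic += (objective: faster).

-- ===== PORT A =====
-- param.replace('.','').lstrip('-').isnumeric():
--   lstrip('-') = dropWhile (· == '-') (exact: strips leading '-' chars);
--   .isnumeric() = PySem.Chars.strIsdigit (exact on the printable-ASCII domain, where the
--   only numeric characters are '0'-'9').
def check_params_are_numeric (paramlist : List String) : Option String :=
  let st := paramlist.foldl (fun (st : List Char × Bool) param =>
    let numeric := if PySem.Chars.count param.toList ['.'] > 1 then false else st.2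
    let numeric := if !(PySem.Chars.strIsdigit
        ((PySem.Chars.replace param.toList ['.'] []).dropWhile (· == '-'))) then false else numeric
    (st.1 ++ param.toList ++ [','], numeric)) ([], true)
  if st.2 then none else some (String.ofList st.1)

-- ===== PORT B =====
-- the character state machine of Source B's _is_numeric_param, step for step:
-- dots counted so far, and whether a digit has been seen
def pvScanNumeric : List Char → Nat → Bool → Bool
  | [], _, seenDigit => seenDigit
  | c :: t, dots, seenDigit =>
    if c = '.' then
      if dots + 1 > 1 then false else pvScanNumeric t (dots + 1) seenDigit
    else if c = '-' then
      if seenDigit then false else pvScanNumeric t dots seenDigit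
    else if '0' ≤ c ∧ c ≤ '9' then
      pvScanNumeric t dots true
    else false

def pvIsNumericParamB (p : String) : Bool := pvScanNumeric p.toList 0 false

-- the early-exit loop of Source B's check_params_are_numeric; ''.join(f'{q},' …) is
-- PySem.Chars.join [] over the "q," pieces
def pvCheckGo (full : List String) : List String → Option String
  | [] => none
  | p :: t =>
    if pvIsNumericParamB p then pvCheckGo full t
    else some (String.ofList (PySem.Chars.join [] (full.map (fun q => q.toList ++ [',']))))

def check_params_are_numeric_alt (paramlist : List String) : Option String :=
  pvCheckGo paramlist paramlist

-- ===== PRECONDITION & SPEC =====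
def Spec_check_params_are_numeric (paramlist : List String) (out : Option String) : Prop := out = check_params_are_numeric_alt paramlist
instance (paramlist : List String) (out : Option String) : Decidable (Spec_check_params_are_numeric paramlist out) := by unfold Spec_check_params_are_numeric; infer_instance

-- ===== CLAIM (what is proved, stated in full; the proofs are below) =====
def Claim_equal_check_params_are_numeric : Prop := ∀ (paramlist : List String), Dom_check_params_are_numeric paramlist → Spec_check_params_are_numeric paramlist (check_params_are_numeric paramlist)

-- ===== LEMMAS AND PROOFS =====

-- A's per-param test, named
def pvIsNumericParamA (p : String) : Bool :=
  PySem.Chars.count p.toList ['.'] ≤ 1 &&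
    PySem.Chars.strIsdigit ((PySem.Chars.replace p.toList ['.'] []).dropWhile (· == '-'))

-- substring count for a one-char pattern is the char count
theorem pv_count_go_single (c : Char) :
    ∀ (fuel : Nat) (l : List Char) (acc : Nat), l.length ≤ fuel →
      PySem.Chars.count.go [c] fuel l acc = acc + l.count c := by
  intro fuel
  induction fuel with
  | zero => intro l acc h; cases l with
    | nil => simp [PySem.Chars.count.go]
    | cons x t => simp at h
  | succ n ih =>
    intro l acc h
    cases l with
    | nil => simp [PySem.Chars.count.go]
    | cons x t =>
      simp only [List.length_cons] at h
      by_cases hx : x = c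
      · subst hx
        simp [PySem.Chars.count.go, List.isPrefixOf, ih t _ (by omega), List.count_cons]
        omega
      · simp [PySem.Chars.count.go, List.isPrefixOf, hx, ih t _ (by omega),
          List.count_cons, Ne.symm hx]

theorem pv_count_single (c : Char) (l : List Char) :
    PySem.Chars.count l [c] = l.count c := by
  simp [PySem.Chars.count, pv_count_go_single c l.length l 0 le_rfl]

-- replacing a one-char pattern by '' is filtering that char out
theorem pv_replace_go_single (c : Char) :
    ∀ (fuel : Nat) (l acc : List Char), l.length ≤ fuel →
      PySem.Chars.replace.go [c] [] fuel l acc = acc.reverse ++ l.filter (· ≠ c) := by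
  intro fuel
  induction fuel with
  | zero => intro l acc h; cases l with
    | nil => simp [PySem.Chars.replace.go]
    | cons x t => simp at h
  | succ n ih =>
    intro l acc h
    cases l with
    | nil => simp [PySem.Chars.replace.go]
    | cons x t =>
      simp only [List.length_cons] at h
      by_cases hx : x = c
      · subst hx
        simp [PySem.Chars.replace.go, List.isPrefixOf, ih t _ (by omega)]
      · simp [PySem.Chars.replace.go, List.isPrefixOf, hx, ih t _ (by omega), Ne.symm hx]

theorem pv_replace_single (c : Char) (l : List Char) :
    PySem.Chars.replace l [c] [] = l.filter (· ≠ c) := by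
  simp [PySem.Chars.replace, pv_replace_go_single c l.length l [] le_rfl]

-- ''.join with an empty separator is concatenation
theorem pv_join_nil_flatten (xss : List (List Char)) :
    PySem.Chars.join [] xss = xss.flatten := by
  induction xss with
  | nil => rfl
  | cons x t ih => cases t <;> simp_all [PySem.Chars.join, List.intercalate, List.intersperse]

-- the state machine's invariant, against A's count/replace/lstrip/isnumeric formulation
theorem pv_scan_invariant :
    ∀ (cs : List Char) (d : Nat) (s : Bool), d ≤ 1 →
      pvScanNumeric cs d s =
        (decide (d + cs.count '.' ≤ 1) &&
          (if s then (cs.filter (· ≠ '.')).all PySem.Chars.isdigit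
           else PySem.Chars.strIsdigit ((cs.filter (· ≠ '.')).dropWhile (· == '-')))) := by
  intro cs
  induction cs with
  | nil =>
    intro d s hd
    cases s <;> simp [pvScanNumeric, PySem.Chars.strIsdigit, hd]
  | cons c t ih =>
    intro d s hd
    by_cases hdot : c = '.'
    · subst hdot
      by_cases hd0 : d = 0
      · subst hd0
        simp only [pvScanNumeric, List.count_cons_self, List.filter_cons]
        rw [ih 1 s (by omega)]
        simp
      · have : d = 1 := by omega
        subst this
        simp [pvScanNumeric, List.count_cons]
    · by_cases hminus : c = '-'
      · subst hminus
        cases s with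
        | true =>
          simp [pvScanNumeric, PySem.Chars.isdigit, List.filter_cons, List.count_cons]
        | false =>
          have h1 : pvScanNumeric ('-' :: t) d false = pvScanNumeric t d false := by
            simp [pvScanNumeric]
          rw [h1, ih d false hd]
          simp [List.filter_cons, List.count_cons]
      · by_cases hdig : '0' ≤ c ∧ c ≤ '9'
        · simp only [pvScanNumeric, if_neg hdot, if_neg hminus, if_pos hdig]
          rw [ih d true hd]
          cases s <;>
            simp [List.filter_cons, List.count_cons, hdot, PySem.Chars.strIsdigit,
              List.dropWhile_cons, hminus, PySem.Chars.isdigit, hdig.1, hdig.2]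
        · have hcd : PySem.Chars.isdigit c = false := by
            simp only [PySem.Chars.isdigit]
            rcases not_and_or.mp hdig with h | h <;> simp [h]
          simp only [pvScanNumeric, if_neg hdot, if_neg hminus, if_neg hdig]
          cases s with
          | true =>
            simp [List.filter_cons, hdot, hcd]
          | false =>
            simp [List.filter_cons, hdot, List.dropWhile_cons, hminus,
              PySem.Chars.strIsdigit, hcd]

-- the two per-param tests agree on every string
theorem pv_param_eq (p : String) : pvIsNumericParamB p = pvIsNumericParamA p := by
  unfold pvIsNumericParamB pvIsNumericParamA
  rw [pv_scan_invariant p.toList 0 false (by omega), pv_count_single, pv_replace_single]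
  simp [PySem.Chars.strIsdigit]

-- A's loop, characterised: it appends "param," for each param and ANDs the per-param checks
theorem pv_foldl_char (l : List String) (res : List Char) (b : Bool) :
    l.foldl (fun (st : List Char × Bool) param =>
      let numeric := if PySem.Chars.count param.toList ['.'] > 1 then false else st.2
      let numeric := if !(PySem.Chars.strIsdigit
          ((PySem.Chars.replace param.toList ['.'] []).dropWhile (· == '-'))) then false else numeric
      (st.1 ++ param.toList ++ [','], numeric)) (res, b)
    = (res ++ (l.map (fun p => p.toList ++ [','])).flatten, b && l.all pvIsNumericParamA) := by
  induction l generalizing res b with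
  | nil => simp
  | cons p t ih =>
    simp only [List.foldl_cons, ih, List.map_cons, List.flatten_cons, List.all_cons,
      Prod.mk.injEq]
    refine ⟨by simp, ?_⟩
    by_cases h1 : PySem.Chars.count p.toList ['.'] > 1 <;>
      cases h2 : PySem.Chars.strIsdigit
        ((PySem.Chars.replace p.toList ['.'] []).dropWhile (· == '-')) <;>
      simp [pvIsNumericParamA, h1, h2, Nat.not_lt.mp]

-- B's early-exit loop, characterised
theorem pv_go_char (full : List String) (l : List String) :
    pvCheckGo full l =
      if l.all pvIsNumericParamB then none
      else some (String.ofList ((full.map (fun q => q.toList ++ [','])).flatten)) := by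
  induction l with
  | nil => simp [pvCheckGo]
  | cons p t ih =>
    by_cases hp : pvIsNumericParamB p <;>
      simp [pvCheckGo, hp, ih, pv_join_nil_flatten]

-- ===== VERDICT (by name: the statement is the Claim_ definition above) =====
theorem check_params_are_numeric_spec : Claim_equal_check_params_are_numeric := by
  intro l _hd
  unfold Spec_check_params_are_numeric check_params_are_numeric check_params_are_numeric_alt
  rw [pv_go_char]
  simp only [pv_foldl_char, Bool.true_and, List.nil_append]
  have : l.all pvIsNumericParamB = l.all pvIsNumericParamA := by
    simp [List.all_eq, pv_param_eq]
  rw [this]
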